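-- pv_equiv track=rewrite | github.com/Bleak-bleak/CSE101 | trifid.py | buildEncipheringTable
-- ===== SOURCE A (Python) =====
-- import string
--
-- def buildEncipheringTable(key):
--     new_key=key.upper()
--     new_key=new_key.replace(" ","")
--     available=list(string.ascii_uppercase)+["!"]
--     lookup=[1,[],[],[]]
--     track=1
--     for i in new_key:
--         if i in available:
--             available.remove(i)
--             lookup[track].append(i)
--             if len(lookup[track]) == 9:
--                 track += 1
--     for y in available:
--         lookup[track].append(y)
--         if len(lookup[track]) == 9:
--             track += 1
--     empt_dic={}
--     for x in range(1,4):
--         for z in lookup[x]: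
--             firstDigit= x
--             letterIndex= lookup[x].index(z)
--             secondDigit=(letterIndex//3)+1
--             thirdDigit=(letterIndex%3)+1
--             empt_dic[z]=firstDigit*100+secondDigit*10+thirdDigit
--
--
--     return empt_dic
-- ===== SOURCE B (Python) =====
-- import string
--
-- def buildEncipheringTable(key):
--     allowed = string.ascii_uppercase + "!"
--     k = [c for c in key.upper() if c in allowed]
--     order = sorted(allowed, key=lambda c: k.index(c) if c in k else len(k) + allowed.index(c))
--     table = {}
--     for i, c in enumerate(order):
--         block, r = divmod(i, 9)
--         row, col = divmod(r, 3)
--         table[c] = 100 * (block + 1) + 10 * (row + 1) + (col + 1)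
--     return table
-- ===== Notes on version B (the rewrite author's own statement) =====
-- stated objective: alternative
-- what changed: A builds the table sequentially (dedup via list.remove on the shrinking 'available' list, three per-block lists filled under an incremental track counter, then a nested loop recovering each symbol's position with .index); B instead computes a numeric rank key for each of the fixed 27 symbols (first-occurrence index in the filtered key, or len(key)+alphabet position for unused symbols), stable-sorts the alphabet by that key, and derives each code from the sorted position by divmod arithmetic.
import Mathlib
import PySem

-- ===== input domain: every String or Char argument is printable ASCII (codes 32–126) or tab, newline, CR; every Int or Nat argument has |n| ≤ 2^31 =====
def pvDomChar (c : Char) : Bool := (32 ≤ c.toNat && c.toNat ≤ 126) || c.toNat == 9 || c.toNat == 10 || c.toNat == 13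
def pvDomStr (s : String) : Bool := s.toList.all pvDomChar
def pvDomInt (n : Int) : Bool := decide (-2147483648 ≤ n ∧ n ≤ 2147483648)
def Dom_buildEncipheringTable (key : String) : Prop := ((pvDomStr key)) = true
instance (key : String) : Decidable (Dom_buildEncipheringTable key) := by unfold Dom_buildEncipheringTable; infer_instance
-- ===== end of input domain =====

-- B replaces A's sequential build (three per-block lists, a track counter, dedup by list.remove,
-- nested .index recovery) by one stable sort of the fixed 27-symbol alphabet under a numeric rank
-- key, followed by a divmod loop over the sorted list (objective: alternative algorithm).

-- ===== PORT A =====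
-- string.ascii_uppercase + ["!"]
def pvAvail : List Char := "ABCDEFGHIJKLMNOPQRSTUVWXYZ!".toList

-- lookup[track].append(c); if len(lookup[track]) == 9: track += 1
-- (track is 1, 2 or 3 whenever Python reaches this append, so the final 'else' is the track = 3 slot)
def pvAppendA (st : List Char × List Char × List Char × Int) (c : Char) :
    List Char × List Char × List Char × Int :=
  match st with
  | (b1, b2, b3, track) =>
    if track = 1 then
      let b1' := b1 ++ [c]
      (b1', b2, b3, if b1'.length = 9 then track + 1 else track)
    else if track = 2 then
      let b2' := b2 ++ [c]
      (b1, b2', b3, if b2'.length = 9 then track + 1 else track)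
    else
      let b3' := b3 ++ [c]
      (b1, b2, b3', if b3'.length = 9 then track + 1 else track)

-- body of the first loop: if i in available: available.remove(i); lookup[track].append(i); …
def pvStepKeyA (st : List Char × (List Char × List Char × List Char × Int)) (c : Char) :
    List Char × (List Char × List Char × List Char × Int) :=
  if c ∈ st.1 then
    -- remove never fails here: c ∈ available was just checked
    (((PySem.List.remove? st.1 c).getD st.1), pvAppendA st.2 c)
  else st

def buildEncipheringTable (key : String) : List (String × Int) :=
  let newKey := PySem.Str.replace (PySem.Str.upper key) " " ""
  let s1 := newKey.toList.foldl pvStepKeyA (pvAvail, ([], [], [], (1 : Int)))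
  let blocks := s1.1.foldl pvAppendA s1.2
  -- lookup[x] for x = 1, 2, 3
  let lookup : Int → List Char := fun x =>
    if x = 1 then blocks.1 else if x = 2 then blocks.2.1 else blocks.2.2.1
  let d := (PySem.List.pyRange 1 4 1).foldl (fun d x =>
      (lookup x).foldl (fun d z =>
        let firstDigit : Int := x
        -- z is an element of lookup[x], so .index never raises
        let letterIndex : Int := (((PySem.List.index? (lookup x) z).getD 0 : Nat) : Int)
        d.insert (String.ofList [z])
          (firstDigit * 100 + (PySem.Int.floordiv letterIndex 3 + 1) * 10 +
            (PySem.Int.mod letterIndex 3 + 1))) d)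
    PySem.Dict.empty
  d.items

-- ===== PORT B =====
-- string.ascii_uppercase + "!"
def pvAllowed : List Char := "ABCDEFGHIJKLMNOPQRSTUVWXYZ!".toList

-- the sort key: lambda c: k.index(c) if c in k else len(k) + allowed.index(c)
-- (.index never raises here: guarded by 'c in k', resp. only applied to elements of allowed)
def pvKeyB (k : List Char) (c : Char) : Int :=
  if c ∈ k then (((PySem.List.index? k c).getD 0 : Nat) : Int)
  else (k.length : Int) + (((PySem.List.index? pvAllowed c).getD 0 : Nat) : Int)

def buildEncipheringTable_alt (key : String) : List (String × Int) :=
  let k := (PySem.Str.upper key).toList.filter (fun c => c ∈ pvAllowed)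
  let order := PySem.List.sorted pvAllowed (pvKeyB k)
  let d := (PySem.List.enumerate order 0).foldl (fun d p =>
      -- block, r = divmod(i, 9); row, col = divmod(r, 3)  (divisors are nonzero literals)
      let block := PySem.Int.floordiv p.1 9
      let r := PySem.Int.mod p.1 9
      let row := PySem.Int.floordiv r 3
      let col := PySem.Int.mod r 3
      d.insert (String.ofList [p.2]) (100 * (block + 1) + 10 * (row + 1) + (col + 1)))
    PySem.Dict.empty
  d.items

-- ===== PRECONDITION & SPEC =====
def Spec_buildEncipheringTable (key : String) (out : List (String × Int)) : Prop := out = buildEncipheringTable_alt key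
instance (key : String) (out : List (String × Int)) : Decidable (Spec_buildEncipheringTable key out) := by unfold Spec_buildEncipheringTable; infer_instance

-- ===== CLAIM (what is proved, stated in full; the proofs are below) =====
def Claim_equal_buildEncipheringTable : Prop := ∀ (key : String), Dom_buildEncipheringTable key → Spec_buildEncipheringTable key (buildEncipheringTable key)

-- ===== LEMMAS AND PROOFS =====

theorem pvAllowed_eq_avail : pvAllowed = pvAvail := rfl

-- the available list after the symbols of o have been removed
def pvRest (o : List Char) : List Char :=
  pvAvail.filter (fun x => !(PySem.Set.contains o x))

-- the flat ordered symbol list after the key loop, starting from accumulated order o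
def pvOrd (o : List Char) : List Char → List Char
  | [] => o
  | c :: cs => if c ∈ pvAvail ∧ c ∉ o then pvOrd (o ++ [c]) cs else pvOrd o cs

-- A's block state as a function of the flat order list
def pvBlocks (o : List Char) : List Char × List Char × List Char × Int :=
  (o.take 9, (o.drop 9).take 9, o.drop 18, ((o.length / 9 : Nat) : Int) + 1)

-- first-occurrence index, total form (only used on members)
def pvIdx (l : List Char) (c : Char) : Nat := (PySem.List.index? l c).getD 0

theorem pvAvail_nodup : pvAvail.Nodup := by decide

theorem pv_mem_rest (o : List Char) (c : Char) :
    c ∈ pvRest o ↔ c ∈ pvAvail ∧ c ∉ o := by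
  simp [pvRest, List.mem_filter]

theorem pv_length_le (o : List Char) (hnd : o.Nodup) (hsub : ∀ c ∈ o, c ∈ pvAvail) :
    o.length ≤ 27 := by
  have h := List.Subperm.length_le (List.subperm_of_subset hnd hsub)
  simpa [pvAvail] using h

theorem pv_erase_filter (c : Char) (f : Char → Bool) :
    ∀ (l : List Char), l.Nodup →
      (l.filter f).erase c = l.filter (fun x => f x && !(x == c)) := by
  intro l hnd
  rw [List.Nodup.erase_eq_filter (hnd.filter f) c, List.filter_filter]
  apply List.filter_congr
  intro x _
  simp [bne, Bool.and_comm]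

theorem pv_rest_snoc (o : List Char) (c : Char) :
    (pvRest o).erase c = pvRest (o ++ [c]) := by
  rw [pvRest, pv_erase_filter c _ pvAvail pvAvail_nodup, pvRest]
  apply List.filter_congr
  intro x _
  cases h1 : PySem.Set.contains o x <;> cases h2 : (x == c) <;>
    simp_all [PySem.Set.contains]

theorem pv_blocks_snoc (o : List Char) (c : Char) (h : o.length < 27) :
    pvAppendA (pvBlocks o) c = pvBlocks (o ++ [c]) := by
  rcases Nat.lt_or_ge o.length 9 with h9 | h9
  · have e : o.length / 9 = 0 := by omega
    have t1 : o.take 9 = o := List.take_of_length_le (by omega)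
    have t2 : o.drop 9 = [] := List.drop_eq_nil_of_le (by omega)
    have t3 : o.drop 18 = [] := List.drop_eq_nil_of_le (by omega)
    have t4 : (o ++ [c]).take 9 = o ++ [c] := List.take_of_length_le (by simp; omega)
    have t5 : (o ++ [c]).drop 9 = [] := List.drop_eq_nil_of_le (by simp; omega)
    have t6 : (o ++ [c]).drop 18 = [] := List.drop_eq_nil_of_le (by simp; omega)
    simp only [pvAppendA, pvBlocks, e, t1, t2, t3, t4, t5, t6]
    norm_num
    split_ifs with hh <;> simp_all <;> omega
  · rcases Nat.lt_or_ge o.length 18 with h18 | h18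
    · have e : o.length / 9 = 1 := by omega
      have t1 : (o ++ [c]).take 9 = o.take 9 := by
        rw [List.take_append]
        simp [show 9 - o.length = 0 by omega]
      have t2 : (o ++ [c]).drop 9 = o.drop 9 ++ [c] := by
        rw [List.drop_append]
        simp [show 9 - o.length = 0 by omega]
      have t3 : (o.drop 9 ++ [c]).take 9 = (o.drop 9).take 9 ++ [c] := by
        rw [List.take_append]
        have hl : (o.drop 9).length = o.length - 9 := by simp
        have hc1 : [c].take (9 - (o.drop 9).length) = [c] :=
          List.take_of_length_le (by simp [hl]; omega)
        rw [hc1]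
      have t4 : o.drop 18 = [] := List.drop_eq_nil_of_le (by omega)
      have t5 : (o ++ [c]).drop 18 = [] := List.drop_eq_nil_of_le (by simp; omega)
      have hlen : ((o.drop 9).take 9 ++ [c]).length = o.length - 9 + 1 := by simp; omega
      simp only [pvAppendA, pvBlocks, e, t1, t2, t3, t4, t5, hlen]
      norm_num
      split_ifs with hh <;> omega
    · have e : o.length / 9 = 2 := by omega
      have t1 : (o ++ [c]).take 9 = o.take 9 := by
        rw [List.take_append]
        simp [show 9 - o.length = 0 by omega]
      have t2 : ((o ++ [c]).drop 9).take 9 = (o.drop 9).take 9 := by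
        rw [List.drop_append, List.take_append]
        have hl : (o.drop 9).length = o.length - 9 := by simp
        simp [hl, show 9 - o.length = 0 by omega, show 9 - (o.length - 9) = 0 by omega]
      have t3 : (o ++ [c]).drop 18 = o.drop 18 ++ [c] := by
        rw [List.drop_append]
        simp [show 18 - o.length = 0 by omega]
      have hlen : (o.drop 18 ++ [c]).length = o.length - 18 + 1 := by simp
      simp only [pvAppendA, pvBlocks, e, t1, t2, t3, hlen]
      norm_num
      split_ifs with hh <;> omega

theorem pv_ord_snoc_inv (o : List Char) (c : Char) (hnd : o.Nodup)
    (hsub : ∀ x ∈ o, x ∈ pvAvail) (hc : c ∈ pvAvail ∧ c ∉ o) :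
    (o ++ [c]).Nodup ∧ (∀ x ∈ o ++ [c], x ∈ pvAvail) ∧ o.length < 27 := by
  have hnd' : (o ++ [c]).Nodup := by
    simp only [List.nodup_append, hnd, List.nodup_singleton, true_and]
    intro a ha b hb
    simp only [List.mem_singleton] at hb
    subst hb
    exact fun h => hc.2 (h ▸ ha)
  have hsub' : ∀ x ∈ o ++ [c], x ∈ pvAvail := by
    intro x hx
    rcases List.mem_append.mp hx with hx | hx
    · exact hsub x hx
    · simp at hx; subst hx; exact hc.1
  have := pv_length_le (o ++ [c]) hnd' hsub'
  simp at this
  exact ⟨hnd', hsub', by omega⟩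

-- phase 1 of A: the key loop preserves the (pvRest o, pvBlocks o) shape
theorem pv_foldA1 (cs : List Char) : ∀ (o : List Char), o.Nodup →
    (∀ x ∈ o, x ∈ pvAvail) →
    List.foldl pvStepKeyA (pvRest o, pvBlocks o) cs
      = (pvRest (pvOrd o cs), pvBlocks (pvOrd o cs)) := by
  induction cs with
  | nil => intro o _ _; rfl
  | cons c cs ih =>
    intro o hnd hsub
    simp only [List.foldl_cons, pvOrd]
    by_cases hc : c ∈ pvAvail ∧ c ∉ o
    · have hcr : c ∈ pvRest o := (pv_mem_rest o c).mpr hc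
      obtain ⟨hnd', hsub', hlt⟩ := pv_ord_snoc_inv o c hnd hsub hc
      rw [if_pos hc]
      have hstep : pvStepKeyA (pvRest o, pvBlocks o) c
          = (pvRest (o ++ [c]), pvBlocks (o ++ [c])) := by
        simp only [pvStepKeyA, if_pos hcr]
        rw [PySem.List.remove?_eq_some_erase _ c hcr]
        simp only [Option.getD_some]
        rw [pv_rest_snoc, pv_blocks_snoc o c hlt]
      rw [hstep, ih (o ++ [c]) hnd' hsub']
    · have hcr : c ∉ pvRest o := fun hx => hc ((pv_mem_rest o c).mp hx)
      rw [if_neg hc]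
      have hstep : pvStepKeyA (pvRest o, pvBlocks o) c = (pvRest o, pvBlocks o) := by
        simp only [pvStepKeyA, if_neg hcr]
      rw [hstep, ih o hnd hsub]

-- phase 2 of A: appending the remaining symbols
theorem pv_foldA2 : ∀ (p o : List Char), (o ++ p).Nodup →
    (∀ x ∈ o ++ p, x ∈ pvAvail) →
    List.foldl pvAppendA (pvBlocks o) p = pvBlocks (o ++ p) := by
  intro p
  induction p with
  | nil => intro o _ _; simp
  | cons c p ih =>
    intro o hnd hsub
    have hassoc : (o ++ [c]) ++ p = o ++ c :: p := by simp
    have hco : c ∉ o := by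
      rw [List.nodup_append] at hnd
      intro hmem
      exact hnd.2.2 c hmem c (by simp) rfl
    have hca : c ∈ pvAvail := hsub c (by simp)
    have hndo : o.Nodup := (List.nodup_append.mp hnd).1
    obtain ⟨_, _, hlt⟩ := pv_ord_snoc_inv o c hndo
      (fun x hx => hsub x (List.mem_append_left _ hx)) ⟨hca, hco⟩
    simp only [List.foldl_cons]
    rw [pv_blocks_snoc o c hlt]
    have := ih (o ++ [c]) (hassoc ▸ hnd) (by rw [hassoc]; exact hsub)
    rw [this, hassoc]

-- pvOrd is the ordered-dedup fold of the allowed characters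
theorem pv_ord_eq_foldl (cs : List Char) : ∀ (o : List Char),
    pvOrd o cs = List.foldl PySem.Set.add o (cs.filter (fun c => decide (c ∈ pvAvail))) := by
  induction cs with
  | nil => intro o; rfl
  | cons c cs ih =>
    intro o
    by_cases ha : c ∈ pvAvail
    · have hf : List.filter (fun c => decide (c ∈ pvAvail)) (c :: cs)
          = c :: List.filter (fun c => decide (c ∈ pvAvail)) cs := by
        simp [ha]
      rw [hf, List.foldl_cons]
      by_cases ho : c ∈ o
      · have hadd : PySem.Set.add o c = o := by
          simp [PySem.Set.add, ho]
        have hord : pvOrd o (c :: cs) = pvOrd o cs := by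
          simp only [pvOrd]; rw [if_neg (fun hh => hh.2 ho)]
        rw [hord, hadd, ih o]
      · have hadd : PySem.Set.add o c = o ++ [c] := by
          simp [PySem.Set.add, ho]
        have hord : pvOrd o (c :: cs) = pvOrd (o ++ [c]) cs := by
          simp only [pvOrd]; rw [if_pos ⟨ha, ho⟩]
        rw [hord, hadd, ih (o ++ [c])]
    · have hf : List.filter (fun c => decide (c ∈ pvAvail)) (c :: cs)
          = List.filter (fun c => decide (c ∈ pvAvail)) cs := by
        simp [ha]
      have hord : pvOrd o (c :: cs) = pvOrd o cs := by
        simp only [pvOrd]; rw [if_neg (fun hh => ha hh.1)]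
      rw [hf, hord, ih o]

-- pvOrd preserves its invariants
theorem pv_ord_inv (cs : List Char) : ∀ (o : List Char), o.Nodup →
    (∀ x ∈ o, x ∈ pvAvail) →
    (pvOrd o cs).Nodup ∧ (∀ x ∈ pvOrd o cs, x ∈ pvAvail) ∧
      (∀ x ∈ o, x ∈ pvOrd o cs) := by
  induction cs with
  | nil => intro o h1 h2; exact ⟨h1, h2, fun x hx => hx⟩
  | cons c cs ih =>
    intro o h1 h2
    simp only [pvOrd]
    by_cases hc : c ∈ pvAvail ∧ c ∉ o
    · rw [if_pos hc]
      obtain ⟨hnd', hsub', _⟩ := pv_ord_snoc_inv o c h1 h2 hc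
      obtain ⟨a, b, d⟩ := ih (o ++ [c]) hnd' hsub'
      exact ⟨a, b, fun x hx => d x (List.mem_append_left _ hx)⟩
    · rw [if_neg hc]; exact ih o h1 h2

-- the completed order list contains all 27 symbols
theorem pv_final_length (o : List Char) (hnd : o.Nodup)
    (hsub : ∀ x ∈ o, x ∈ pvAvail) :
    (o ++ pvRest o).length = 27 ∧ (o ++ pvRest o).Nodup ∧
      (∀ x ∈ o ++ pvRest o, x ∈ pvAvail) := by
  have hrest_nd : (pvRest o).Nodup := List.Nodup.filter _ pvAvail_nodup
  have hnd' : (o ++ pvRest o).Nodup := by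
    rw [List.nodup_append]
    refine ⟨hnd, hrest_nd, ?_⟩
    intro a ha b hb hab
    exact ((pv_mem_rest o b).mp hb).2 (hab ▸ ha)
  have hsub' : ∀ x ∈ o ++ pvRest o, x ∈ pvAvail := by
    intro x hx
    rcases List.mem_append.mp hx with hx | hx
    · exact hsub x hx
    · exact ((pv_mem_rest o x).mp hx).1
  have hsup : ∀ x ∈ pvAvail, x ∈ o ++ pvRest o := by
    intro x hx
    by_cases hm : x ∈ o
    · exact List.mem_append_left _ hm
    · exact List.mem_append_right _ ((pv_mem_rest o x).mpr ⟨hx, hm⟩)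
  have h1 : (o ++ pvRest o).length ≤ 27 := pv_length_le _ hnd' hsub'
  have h2 : 27 ≤ (o ++ pvRest o).length := by
    have := List.Subperm.length_le (List.subperm_of_subset pvAvail_nodup hsup)
    simpa [pvAvail] using this
  exact ⟨by omega, hnd', hsub'⟩

-- first-occurrence index facts
theorem pv_idx_lt_length (l : List Char) (c : Char) (h : c ∈ l) : pvIdx l c < l.length := by
  obtain ⟨k, hk⟩ := Option.isSome_iff_exists.mp ((PySem.List.index?_isSome_iff l c).mpr h)
  obtain ⟨hlt, -, -⟩ := PySem.List.getElem_of_index?_eq_some hk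
  simp only [pvIdx, hk, Option.getD_some]
  exact hlt

theorem pv_idx_append_of_mem (l t : List Char) (c : Char) (h : c ∈ l) :
    pvIdx (l ++ t) c = pvIdx l c := by
  simp only [pvIdx]
  rw [PySem.List.index?_append_of_mem t h]

theorem pv_idx_append_self (l : List Char) (c : Char) (h : c ∉ l) :
    pvIdx (l ++ [c]) c = l.length := by
  simp only [pvIdx]
  rw [PySem.List.index?_append_singleton_self l c h]
  rfl

-- ordered dedup lists first occurrences in strictly increasing index order
theorem pv_pairwise_ofList (l : List Char) :
    (PySem.Set.ofList l).Pairwise (fun a b => pvIdx l a < pvIdx l b) := by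
  induction l using List.reverseRecOn with
  | nil => simp [PySem.Set.ofList_nil]
  | append_singleton l c ih =>
    rw [PySem.Set.ofList_append_singleton]
    by_cases hc : c ∈ l
    · have hadd : PySem.Set.add (PySem.Set.ofList l) c = PySem.Set.ofList l := by
        simp [PySem.Set.add, PySem.Set.mem_ofList, hc]
      rw [hadd]
      refine ih.imp_of_mem ?_
      intro a b ha hb hab
      rw [pv_idx_append_of_mem l [c] a ((PySem.Set.mem_ofList l a).mp ha),
        pv_idx_append_of_mem l [c] b ((PySem.Set.mem_ofList l b).mp hb)]
      exact hab
    · have hadd : PySem.Set.add (PySem.Set.ofList l) c = PySem.Set.ofList l ++ [c] := by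
        simp [PySem.Set.add, PySem.Set.mem_ofList, hc]
      rw [hadd, List.pairwise_append]
      refine ⟨?_, by simp, ?_⟩
      · refine ih.imp_of_mem ?_
        intro a b ha hb hab
        rw [pv_idx_append_of_mem l [c] a ((PySem.Set.mem_ofList l a).mp ha),
          pv_idx_append_of_mem l [c] b ((PySem.Set.mem_ofList l b).mp hb)]
        exact hab
      · intro a ha b hb
        simp only [List.mem_singleton] at hb
        subst hb
        have hal : a ∈ l := (PySem.Set.mem_ofList l a).mp ha
        rw [pv_idx_append_of_mem l [b] a hal, pv_idx_append_self l b hc]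
        exact pv_idx_lt_length l a hal

-- the fixed alphabet is strictly increasing under its own index
theorem pv_pairwise_avail :
    pvAvail.Pairwise (fun a b => pvIdx pvAvail a < pvIdx pvAvail b) := by decide

-- the sorted call of B produces exactly A's flat order list
theorem pv_sorted_eq (cs ks : List Char)
    (hks : ks = cs.filter (fun c => decide (c ∈ pvAvail))) :
    PySem.List.sorted pvAllowed (pvKeyB ks)
      = pvOrd [] cs ++ pvRest (pvOrd [] cs) := by
  have hL : pvOrd [] cs = PySem.Set.ofList ks := by
    rw [pv_ord_eq_foldl cs [], PySem.Set.ofList_eq_foldl, hks]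
  obtain ⟨hnd1, hsub1, -⟩ := pv_ord_inv cs [] List.nodup_nil (by simp)
  obtain ⟨hlen, hndO, hsubO⟩ := pv_final_length (pvOrd [] cs) hnd1 hsub1
  set L := pvOrd [] cs with hLdef
  have hmemL : ∀ x, x ∈ L ↔ x ∈ ks := by
    intro x; rw [hL]; exact PySem.Set.mem_ofList ks x
  -- permutation with the alphabet
  have hperm : (L ++ pvRest L).Perm pvAllowed := by
    rw [pvAllowed_eq_avail]
    exact List.Subperm.perm_of_length_le (List.subperm_of_subset hndO hsubO)
      (by simp only [hlen]; decide)
  -- strictly increasing keys along L ++ pvRest L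
  have hpair : (L ++ pvRest L).Pairwise (fun a b => pvKeyB ks a < pvKeyB ks b) := by
    rw [List.pairwise_append]
    refine ⟨?_, ?_, ?_⟩
    · have := pv_pairwise_ofList ks
      rw [← hL] at this
      refine this.imp_of_mem ?_
      intro a b ha hb hab
      have hak := (hmemL a).mp ha
      have hbk := (hmemL b).mp hb
      simp only [pvKeyB, if_pos hak, if_pos hbk]
      exact_mod_cast hab
    · have hsl : (pvRest L).Sublist pvAvail := List.filter_sublist
      have := List.Pairwise.sublist hsl pv_pairwise_avail
      refine this.imp_of_mem ?_
      intro a b ha hb hab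
      have hanK : a ∉ ks := fun hk => ((pv_mem_rest L a).mp ha).2 ((hmemL a).mpr hk)
      have hbnK : b ∉ ks := fun hk => ((pv_mem_rest L b).mp hb).2 ((hmemL b).mpr hk)
      simp only [pvKeyB, if_neg hanK, if_neg hbnK, pvAllowed_eq_avail]
      have : (pvIdx pvAvail a : Int) < (pvIdx pvAvail b : Int) := by exact_mod_cast hab
      simp only [pvIdx] at this
      omega
    · intro a ha b hb
      have hak := (hmemL a).mp ha
      have hbnK : b ∉ ks := fun hk => ((pv_mem_rest L b).mp hb).2 ((hmemL b).mpr hk)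
      simp only [pvKeyB, if_pos hak, if_neg hbnK]
      have h1 : pvIdx ks a < ks.length := pv_idx_lt_length ks a hak
      have h2 : (pvIdx ks a : Int) < (ks.length : Int) := by exact_mod_cast h1
      have h3 : (0 : Int) ≤ ((PySem.List.index? pvAllowed b).getD 0 : Nat) := Int.natCast_nonneg _
      simp only [pvIdx] at h2
      omega
  exact PySem.List.sorted_eq_of_perm_of_pairwise_lt pvAllowed (L ++ pvRest L) (pvKeyB ks)
    hperm hpair

-- .replace(" ", "") is the space filter
theorem pv_replace_go (fuel : Nat) : ∀ (l acc : List Char), l.length ≤ fuel →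
    PySem.Chars.replace.go [' '] [] fuel l acc = acc.reverse ++ l.filter (fun c => !(c == ' ')) := by
  induction fuel with
  | zero =>
    intro l acc h
    have : l = [] := List.eq_nil_of_length_eq_zero (by omega)
    subst this
    simp [PySem.Chars.replace.go]
  | succ fuel ih =>
    intro l acc h
    cases l with
    | nil => simp [PySem.Chars.replace.go]
    | cons c t =>
      by_cases hc : c = ' '
      · subst hc
        have hp : [' '].isPrefixOf (' ' :: t) = true := by simp [List.isPrefixOf]
        simp only [PySem.Chars.replace.go, hp, if_true]
        rw [show List.drop [' '].length (' ' :: t) = t from rfl,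
          show ([] : List Char).reverse ++ acc = acc from rfl,
          ih t acc (by simpa using Nat.le_of_succ_le_succ h)]
        simp
      · have hp : [' '].isPrefixOf (c :: t) = false := by
          simp [List.isPrefixOf]; exact fun hh => hc hh.symm
        simp only [PySem.Chars.replace.go, hp]
        rw [if_neg (by simp), ih t (c :: acc) (by simpa using Nat.le_of_succ_le_succ h)]
        simp [hc]

theorem pv_replace_space (l : List Char) :
    PySem.Chars.replace l [' '] [] = l.filter (fun c => !(c == ' ')) := by
  rw [PySem.Chars.replace, if_neg (by simp)]
  exact pv_replace_go l.length l [] le_rfl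

-- filtering the allowed symbols ignores the space removal (space is not allowed)
theorem pv_filter_filter (l : List Char) :
    (l.filter (fun c => !(c == ' '))).filter (fun c => decide (c ∈ pvAvail))
      = l.filter (fun c => decide (c ∈ pvAllowed)) := by
  rw [List.filter_filter]
  apply List.filter_congr
  intro c _
  by_cases hc : c = ' '
  · subst hc; decide
  · have hb : (c == ' ') = false := by simpa using hc
    simp [pvAllowed_eq_avail, hb]

-- fold an insert loop as a fold over the list of inserted pairs
def pvInsPair (d : PySem.Dict String Int) (p : String × Int) : PySem.Dict String Int :=
  d.insert p.1 p.2

theorem pv_idx_getElem (l : List Char) (h : l.Nodup) (j : Nat) (hj : j < l.length) :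
    ((PySem.List.index? l l[j]).getD 0 : Nat) = j := by
  rw [PySem.List.index?_eq_idxOf?]
  have : l.idxOf? l[j] = some j := by
    refine List.idxOf?_eq_some_iff.mpr ⟨hj, rfl, ?_⟩
    intro j1 hj1 heq
    have := (List.Nodup.getElem_inj_iff h (hi := by omega) (hj := hj)).mp heq
    omega
  simp [this]

-- one block of A's table loop equals the corresponding enumerate segment of B's loop
theorem pv_block_map (blk : List Char) (hnd : blk.Nodup) (hlen : blk.length = 9)
    (k : Nat) (hk : k ≤ 2) :
    blk.map (fun z => (String.ofList [z],
        ((k : Int) + 1) * 100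
          + (PySem.Int.floordiv (((PySem.List.index? blk z).getD 0 : Nat) : Int) 3 + 1) * 10
          + (PySem.Int.mod (((PySem.List.index? blk z).getD 0 : Nat) : Int) 3 + 1)))
      = (PySem.List.enumerate blk (9 * (k : Int))).map (fun p => (String.ofList [p.2],
          100 * (PySem.Int.floordiv p.1 9 + 1)
            + 10 * (PySem.Int.floordiv (PySem.Int.mod p.1 9) 3 + 1)
            + (PySem.Int.mod (PySem.Int.mod p.1 9) 3 + 1))) := by
  apply List.ext_getElem
  · simp [PySem.List.length_enumerate]
  · intro j h1 h2
    have hjl : j < blk.length := by simpa using h1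
    have hj9 : j < 9 := by omega
    simp only [List.getElem_map, PySem.List.getElem_enumerate]
    have hidx := pv_idx_getElem blk hnd j hjl
    rw [hidx]
    simp only [Prod.mk.injEq, true_and]
    have m9 : ∀ a : Int, PySem.Int.mod a 9 = a % 9 :=
      fun a => PySem.Int.mod_eq_emod_of_pos (by norm_num)
    have m3 : ∀ a : Int, PySem.Int.mod a 3 = a % 3 :=
      fun a => PySem.Int.mod_eq_emod_of_pos (by norm_num)
    have d9 : ∀ a : Int, PySem.Int.floordiv a 9 = a / 9 :=
      fun a => PySem.Int.floordiv_eq_ediv_of_pos (by norm_num)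
    have d3 : ∀ a : Int, PySem.Int.floordiv a 3 = a / 3 :=
      fun a => PySem.Int.floordiv_eq_ediv_of_pos (by norm_num)
    simp only [m9, m3, d9, d3]
    have hkj : (0:Int) ≤ (k:Int) ∧ (k:Int) ≤ 2 ∧ (0:Int) ≤ (j:Int) ∧ (j:Int) < 9 := by
      constructor; · exact_mod_cast Nat.zero_le k
      constructor; · exact_mod_cast hk
      constructor; · exact_mod_cast Nat.zero_le j
      exact_mod_cast hj9
    omega

theorem pv_seg (blk : List Char) (hnd : blk.Nodup) (hlen : blk.length = 9)
    (k : Nat) (hk : k ≤ 2) (d : PySem.Dict String Int) :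
    blk.foldl (fun d z =>
        d.insert (String.ofList [z])
          (((k : Int) + 1) * 100 +
            (PySem.Int.floordiv (((PySem.List.index? blk z).getD 0 : Nat) : Int) 3 + 1) * 10 +
            (PySem.Int.mod (((PySem.List.index? blk z).getD 0 : Nat) : Int) 3 + 1))) d
      = (PySem.List.enumerate blk (9 * (k : Int))).foldl (fun d p =>
          d.insert (String.ofList [p.2])
            (100 * (PySem.Int.floordiv p.1 9 + 1) +
              10 * (PySem.Int.floordiv (PySem.Int.mod p.1 9) 3 + 1) +
              (PySem.Int.mod (PySem.Int.mod p.1 9) 3 + 1))) d := by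
  have hA : blk.foldl (fun d z =>
        d.insert (String.ofList [z])
          (((k : Int) + 1) * 100 +
            (PySem.Int.floordiv (((PySem.List.index? blk z).getD 0 : Nat) : Int) 3 + 1) * 10 +
            (PySem.Int.mod (((PySem.List.index? blk z).getD 0 : Nat) : Int) 3 + 1))) d
      = List.foldl pvInsPair d (blk.map (fun z => (String.ofList [z],
          ((k : Int) + 1) * 100 +
            (PySem.Int.floordiv (((PySem.List.index? blk z).getD 0 : Nat) : Int) 3 + 1) * 10 +
            (PySem.Int.mod (((PySem.List.index? blk z).getD 0 : Nat) : Int) 3 + 1)))) := by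
    rw [List.foldl_map]
    rfl
  have hB : (PySem.List.enumerate blk (9 * (k : Int))).foldl (fun d p =>
          d.insert (String.ofList [p.2])
            (100 * (PySem.Int.floordiv p.1 9 + 1) +
              10 * (PySem.Int.floordiv (PySem.Int.mod p.1 9) 3 + 1) +
              (PySem.Int.mod (PySem.Int.mod p.1 9) 3 + 1))) d
      = List.foldl pvInsPair d ((PySem.List.enumerate blk (9 * (k : Int))).map (fun p =>
          (String.ofList [p.2],
            100 * (PySem.Int.floordiv p.1 9 + 1) +
              10 * (PySem.Int.floordiv (PySem.Int.mod p.1 9) 3 + 1) +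
              (PySem.Int.mod (PySem.Int.mod p.1 9) 3 + 1)))) := by
    rw [List.foldl_map]
    rfl
  rw [hA, hB, pv_block_map blk hnd hlen k hk]

theorem pv_dict (O : List Char) (hnd : O.Nodup) (hlen : O.length = 27) :
    (List.foldl (fun d x =>
        List.foldl (fun d z =>
            d.insert (String.ofList [z])
              (x * 100 +
                (PySem.Int.floordiv
                    (((PySem.List.index?
                        (if x = 1 then (pvBlocks O).1
                         else if x = 2 then (pvBlocks O).2.1 else (pvBlocks O).2.2.1) z).getD 0 : Nat) : Int)
                    3 + 1) * 10 +
                (PySem.Int.mod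
                    (((PySem.List.index?
                        (if x = 1 then (pvBlocks O).1
                         else if x = 2 then (pvBlocks O).2.1 else (pvBlocks O).2.2.1) z).getD 0 : Nat) : Int)
                    3 + 1)))
          d (if x = 1 then (pvBlocks O).1
             else if x = 2 then (pvBlocks O).2.1 else (pvBlocks O).2.2.1))
      PySem.Dict.empty (PySem.List.pyRange 1 4)).items
    = (List.foldl (fun d p =>
          d.insert (String.ofList [p.2])
            (100 * (PySem.Int.floordiv p.1 9 + 1) +
              10 * (PySem.Int.floordiv (PySem.Int.mod p.1 9) 3 + 1) +
              (PySem.Int.mod (PySem.Int.mod p.1 9) 3 + 1)))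
        PySem.Dict.empty (PySem.List.enumerate O)).items := by
  have hb1l : (O.take 9).length = 9 := by simp [hlen]
  have hb2l : ((O.drop 9).take 9).length = 9 := by simp [hlen]
  have hb3l : (O.drop 18).length = 9 := by simp [hlen]
  have hnd1 : (O.take 9).Nodup := List.Nodup.sublist (List.take_sublist _ _) hnd
  have hnd2 : ((O.drop 9).take 9).Nodup :=
    List.Nodup.sublist ((List.take_sublist _ _).trans (List.drop_sublist _ _)) hnd
  have hnd3 : (O.drop 18).Nodup := List.Nodup.sublist (List.drop_sublist _ _) hnd
  have hsplit : O = O.take 9 ++ ((O.drop 9).take 9 ++ O.drop 18) := by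
    conv_lhs => rw [← List.take_append_drop 9 O]
    congr 1
    conv_lhs => rw [← List.take_append_drop 9 (O.drop 9)]
    rw [List.drop_drop]
  have hpr : PySem.List.pyRange 1 4 = [1, 2, 3] := by decide
  rw [hpr]
  simp only [List.foldl_cons, List.foldl_nil, pvBlocks]
  norm_num
  have e0 := pv_seg (O.take 9) hnd1 hb1l 0 (by norm_num)
  have e1 := pv_seg ((O.drop 9).take 9) hnd2 hb2l 1 (by norm_num)
  have e2 := pv_seg (O.drop 18) hnd3 hb3l 2 (by norm_num)
  norm_num at e0 e1 e2
  conv_rhs => rw [hsplit, PySem.List.enumerate_append, PySem.List.enumerate_append]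
  rw [List.foldl_append, List.foldl_append, hb1l, hb2l]
  norm_num
  rw [e0, e1, e2]

theorem pv_main (cs ks : List Char)
    (hks : ks = cs.filter (fun c => decide (c ∈ pvAvail))) :
    (let s1 := cs.foldl pvStepKeyA (pvAvail, ([], [], [], (1 : Int)))
     let blocks := s1.1.foldl pvAppendA s1.2
     let lookup : Int → List Char := fun x =>
       if x = 1 then blocks.1 else if x = 2 then blocks.2.1 else blocks.2.2.1
     let d := (PySem.List.pyRange 1 4 1).foldl (fun d x =>
         (lookup x).foldl (fun d z =>
           let firstDigit : Int := x
           let letterIndex : Int := (((PySem.List.index? (lookup x) z).getD 0 : Nat) : Int)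
           d.insert (String.ofList [z])
             (firstDigit * 100 + (PySem.Int.floordiv letterIndex 3 + 1) * 10 +
               (PySem.Int.mod letterIndex 3 + 1))) d)
       PySem.Dict.empty
     d.items)
    =
    (let order := PySem.List.sorted pvAllowed (pvKeyB ks)
     let d := (PySem.List.enumerate order 0).foldl (fun d p =>
         let block := PySem.Int.floordiv p.1 9
         let r := PySem.Int.mod p.1 9
         let row := PySem.Int.floordiv r 3
         let col := PySem.Int.mod r 3
         d.insert (String.ofList [p.2]) (100 * (block + 1) + 10 * (row + 1) + (col + 1)))
       PySem.Dict.empty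
     d.items) := by
  dsimp only
  have h0a : ((pvAvail, (([] : List Char), ([] : List Char), ([] : List Char), (1 : Int))) :
      List Char × (List Char × List Char × List Char × Int)) = (pvRest [], pvBlocks []) := by
    simp [pvRest, pvBlocks, PySem.Set.contains]
  rw [h0a, pv_foldA1 cs [] List.nodup_nil (by simp)]
  dsimp only
  obtain ⟨hnd1, hsub1, -⟩ := pv_ord_inv cs [] List.nodup_nil (by simp)
  obtain ⟨hlen, hndF, hsubF⟩ := pv_final_length (pvOrd [] cs) hnd1 hsub1
  rw [pv_foldA2 (pvRest (pvOrd [] cs)) (pvOrd [] cs) hndF hsubF]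
  rw [pv_sorted_eq cs ks hks]
  generalize hg : pvOrd [] cs ++ pvRest (pvOrd [] cs) = O at hlen hndF hsubF
  exact pv_dict O hndF hlen

-- ===== VERDICT (by name: the statement is the Claim_ definition above) =====
theorem buildEncipheringTable_spec : Claim_equal_buildEncipheringTable := by
  intro key _
  unfold Spec_buildEncipheringTable buildEncipheringTable buildEncipheringTable_alt
  have h1 : (PySem.Str.replace (PySem.Str.upper key) " " "").toList
      = (PySem.Str.upper key).toList.filter (fun c => !(c == ' ')) := by
    rw [PySem.Str.toList_replace]
    exact pv_replace_space _
  have hks : (PySem.Str.upper key).toList.filter (fun c => decide (c ∈ pvAllowed))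
      = ((PySem.Str.replace (PySem.Str.upper key) " " "").toList).filter
          (fun c => decide (c ∈ pvAvail)) := by
    rw [h1, pv_filter_filter]
  exact pv_main ((PySem.Str.replace (PySem.Str.upper key) " " "").toList)
    ((PySem.Str.upper key).toList.filter (fun c => decide (c ∈ pvAllowed))) hks
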